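-- pv_equiv track=rewrite | github.com/bappa0125/zyon_ticketing | backend/app/services/narrative_strategy_llm_router.py | _get_all_parents
-- ===== SOURCE A (Python) =====
-- def _get_all_parents(tag: str, parent_map: dict[str, list[str]]) -> set[str]:
--     """
--     Return transitive closure of parents for tag. Assumes parent_map already validated (acyclic, known parents).
--     """
--     start = (tag or "").strip()
--     if not start:
--         return set()
--     out: set[str] = set()
--     stack = list(parent_map.get(start, []))
--     while stack:
--         p = stack.pop()
--         if p in out:
--             continue
--         out.add(p)
--         stack.extend(parent_map.get(p, []))
--     return out
-- ===== SOURCE B (Python) =====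
-- def _get_all_parents(tag: str, parent_map: dict[str, list[str]]) -> set[str]:
--     """Recursive DFS re-implementation: transitive closure of parents for tag."""
--     start = (tag or "").strip()
--     if not start:
--         return set()
--     out: set[str] = set()
--
--     def visit(node: str) -> None:
--         # visiting order is irrelevant for the resulting set
--         for p in reversed(parent_map.get(node, [])):
--             if p not in out:
--                 out.add(p)
--                 visit(p)
--
--     visit(start)
--     return out
-- ===== Notes on version B (the rewrite author's own statement) =====
-- stated objective: alternative
-- what changed: Replaces A's explicit worklist stack (while loop with pop/extend and membership check at pop time) by a recursive depth-first visit helper that checks membership before descending.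
import Mathlib
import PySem

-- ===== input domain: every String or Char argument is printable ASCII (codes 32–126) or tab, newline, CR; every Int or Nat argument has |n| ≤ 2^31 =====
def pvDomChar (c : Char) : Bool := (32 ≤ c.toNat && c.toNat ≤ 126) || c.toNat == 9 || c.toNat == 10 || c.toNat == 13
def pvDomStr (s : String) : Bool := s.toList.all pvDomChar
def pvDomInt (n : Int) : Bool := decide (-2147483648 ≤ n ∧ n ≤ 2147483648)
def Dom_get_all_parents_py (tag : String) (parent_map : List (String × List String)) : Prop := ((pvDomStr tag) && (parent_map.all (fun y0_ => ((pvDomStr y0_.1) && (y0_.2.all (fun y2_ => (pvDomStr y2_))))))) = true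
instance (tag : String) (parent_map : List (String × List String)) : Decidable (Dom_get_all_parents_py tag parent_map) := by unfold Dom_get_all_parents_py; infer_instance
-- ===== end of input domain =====

-- B replaces A's explicit worklist stack by a recursive depth-first visit helper (alternative decomposition, same cost).
-- ===== PORT A =====
-- A's while-loop over the stack; the Nat fuel is only a totality guard (proved sufficient below), none is never returned for the fuel used.
def pvALoop (pm : PySem.Dict String (List String)) (fuel : Nat) (stack : List String)
    (out : PySem.Set String) : Option (PySem.Set String) :=
  match h : stack.getLast? with
  | none => some out                   -- while stack: … exits
  | some p =>                          -- p = stack.pop()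
    if PySem.Set.contains out p then
      pvALoop pm fuel stack.dropLast out
    else
      match fuel with
      | 0 => none
      | f + 1 =>
        pvALoop pm f (stack.dropLast ++ PySem.Dict.getD pm p []) (PySem.Set.add out p)
termination_by (fuel, stack.length)
decreasing_by
  · apply Prod.Lex.right
    have hne : stack ≠ [] := by intro hs; simp [hs] at h
    have hpos : 0 < stack.length := List.length_pos_iff.mpr hne
    simp [List.length_dropLast]; omega
  · apply Prod.Lex.left; omega

def get_all_parents_py (tag : String) (parent_map : List (String × List String)) : List String :=
  let start := PySem.Str.strip (if tag == "" then "" else tag)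
  if start == "" then []
  else
    let d := PySem.Dict.mk parent_map
    let stack := PySem.Dict.getD d start []
    (pvALoop d ((parent_map.flatMap Prod.snd).length + 1) stack PySem.Set.empty).getD PySem.Set.empty

-- ===== PORT B =====
-- B's recursive visit(node); fuel is again only a totality guard, proved never exhausted for the value used.
mutual
def pvBVisit (pm : PySem.Dict String (List String)) (fuel : Nat) (node : String)
    (out : PySem.Set String) : Option (PySem.Set String) :=
  pvBGo pm fuel (PySem.Dict.getD pm node []).reverse out
termination_by (fuel, (PySem.Dict.getD pm node []).reverse.length + 1)
decreasing_by
  apply Prod.Lex.right; simp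

def pvBGo (pm : PySem.Dict String (List String)) (fuel : Nat) (ps : List String)
    (out : PySem.Set String) : Option (PySem.Set String) :=
  match ps with
  | [] => some out
  | p :: rest =>
    if PySem.Set.contains out p then pvBGo pm fuel rest out
    else
      match fuel with
      | 0 => none
      | f + 1 => do
        let out' ← pvBVisit pm f p (PySem.Set.add out p)
        pvBGo pm f rest out'
termination_by (fuel, ps.length)
decreasing_by
  · apply Prod.Lex.right; simp
  · apply Prod.Lex.left; omega
  · apply Prod.Lex.left; omega
end

def get_all_parents_py_alt (tag : String) (parent_map : List (String × List String)) : List String :=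
  let start := PySem.Str.strip (if tag == "" then "" else tag)
  if start == "" then []
  else
    let d := PySem.Dict.mk parent_map
    (pvBVisit d ((parent_map.flatMap Prod.snd).length + 1) start PySem.Set.empty).getD PySem.Set.empty

-- ===== PRECONDITION & SPEC =====
def Spec_get_all_parents_py (tag : String) (parent_map : List (String × List String)) (out : List String) : Prop := out = get_all_parents_py_alt tag parent_map
instance (tag : String) (parent_map : List (String × List String)) (out : List String) : Decidable (Spec_get_all_parents_py tag parent_map out) := by unfold Spec_get_all_parents_py; infer_instance

-- ===== CLAIM (what is proved, stated in full; the proofs are below) =====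
def Claim_equal_get_all_parents_py : Prop := ∀ (tag : String) (parent_map : List (String × List String)), Dom_get_all_parents_py tag parent_map → Spec_get_all_parents_py tag parent_map (get_all_parents_py tag parent_map)

-- ===== LEMMAS AND PROOFS =====

-- proof-side reformulation of A's loop on the reversed stack (pop-from-front)
def pvRLoop (pm : PySem.Dict String (List String)) (fuel : Nat) (stack : List String)
    (out : PySem.Set String) : Option (PySem.Set String) :=
  match stack with
  | [] => some out
  | p :: r =>
    if PySem.Set.contains out p then pvRLoop pm fuel r out
    else
      match fuel with
      | 0 => none
      | f + 1 => pvRLoop pm f ((PySem.Dict.getD pm p []).reverse ++ r) (PySem.Set.add out p)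
termination_by (fuel, stack.length)
decreasing_by
  · apply Prod.Lex.right; simp
  · apply Prod.Lex.left; omega

theorem pvALoop_eq_rLoop (pm : PySem.Dict String (List String)) :
    ∀ fuel stack out, pvALoop pm fuel stack out = pvRLoop pm fuel stack.reverse out := by
  intro fuel
  induction fuel using Nat.strong_induction_on with
  | _ fuel IHf =>
    intro stack out
    induction stack using List.reverseRecOn generalizing out with
    | nil => simp [pvALoop, pvRLoop]
    | append_singleton s p IH =>
      rw [pvALoop]
      split
      next heq => simp at heq
      next p1 heq =>
        rw [List.getLast?_concat] at heq
        injection heq with heq; subst heq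
        simp only [List.dropLast_concat, List.reverse_append, List.reverse_cons,
          List.reverse_nil, List.nil_append, List.singleton_append]
        rw [pvRLoop.eq_def]
        dsimp only
        by_cases hc : PySem.Set.contains out p
        · simp only [hc, if_true]
          exact IH out
        · simp only [hc]
          simp only [Bool.false_eq_true, if_false]
          cases fuel with
          | zero => rfl
          | succ f =>
            show pvALoop pm f (s ++ pm.getD p []) (out.add p) =
              pvRLoop pm f ((pm.getD p []).reverse ++ s.reverse) (out.add p)
            rw [IHf f (Nat.lt_succ_self f)]
            simp [List.reverse_append]

theorem pvRLoop_mono (pm : PySem.Dict String (List String)) :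
    ∀ fuel stack out res, pvRLoop pm fuel stack out = some res →
      pvRLoop pm (fuel + 1) stack out = some res := by
  intro fuel
  induction fuel using Nat.strong_induction_on with
  | _ fuel IHf =>
    intro stack
    induction stack with
    | nil => intro out res h; rw [pvRLoop.eq_1] at h ⊢; exact h
    | cons p r IH =>
      intro out res h
      rw [pvRLoop.eq_def] at h ⊢
      dsimp only at h ⊢
      by_cases hc : PySem.Set.contains out p
      · simp only [hc, if_true] at h ⊢
        exact IH out res h
      · simp only [hc, Bool.false_eq_true, if_false] at h ⊢
        cases fuel with
        | zero => exact absurd h (by simp)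
        | succ f =>
          show pvRLoop pm (f + 1) ((pm.getD p []).reverse ++ r) (out.add p) = some res
          exact IHf f (Nat.lt_succ_self f) _ _ _ h

theorem pvRLoop_split (pm : PySem.Dict String (List String)) :
    ∀ fuel x y out res, pvRLoop pm fuel (x ++ y) out = some res →
      ∃ mid, pvRLoop pm fuel x out = some mid ∧ pvRLoop pm fuel y mid = some res := by
  intro fuel
  induction fuel using Nat.strong_induction_on with
  | _ fuel IHf =>
    intro x
    induction x with
    | nil => intro y out res h; exact ⟨out, pvRLoop.eq_1 _ _ _, h⟩
    | cons p x' IH =>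
      intro y out res h
      rw [List.cons_append, pvRLoop.eq_def] at h
      dsimp only at h
      by_cases hc : PySem.Set.contains out p
      · simp only [hc, if_true] at h
        obtain ⟨mid, h1, h2⟩ := IH y out res h
        refine ⟨mid, ?_, h2⟩
        rw [pvRLoop.eq_def]; dsimp only
        simp only [hc, if_true]
        exact h1
      · simp only [hc, Bool.false_eq_true, if_false] at h
        cases fuel with
        | zero => exact absurd h (by simp)
        | succ f =>
          replace h : pvRLoop pm f (((pm.getD p []).reverse ++ x') ++ y) (out.add p) = some res := by
            rw [List.append_assoc]; exact h
          obtain ⟨mid, h1, h2⟩ := IHf f (Nat.lt_succ_self f) _ y _ res h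
          refine ⟨mid, ?_, pvRLoop_mono pm f y mid res h2⟩
          rw [pvRLoop.eq_def]; dsimp only
          simp only [hc, Bool.false_eq_true, if_false]
          exact h1

theorem pvRLoop_to_bGo (pm : PySem.Dict String (List String)) :
    ∀ fuel stack out res, pvRLoop pm fuel stack out = some res →
      pvBGo pm fuel stack out = some res := by
  intro fuel
  induction fuel using Nat.strong_induction_on with
  | _ fuel IHf =>
    intro stack
    induction stack with
    | nil => intro out res h; rw [pvRLoop.eq_1] at h; rw [pvBGo.eq_1]; exact h
    | cons p rest IH =>
      intro out res h
      rw [pvRLoop.eq_def] at h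
      dsimp only at h
      rw [pvBGo.eq_def]
      dsimp only
      by_cases hc : PySem.Set.contains out p
      · simp only [hc, if_true] at h ⊢
        exact IH out res h
      · simp only [hc, Bool.false_eq_true, if_false] at h ⊢
        cases fuel with
        | zero => exact h
        | succ f =>
          replace h : pvRLoop pm f ((pm.getD p []).reverse ++ rest) (out.add p) = some res := h
          obtain ⟨mid, h1, h2⟩ := pvRLoop_split pm f _ rest _ res h
          have hb1 : pvBVisit pm f p (out.add p) = some mid := by
            rw [pvBVisit]
            exact IHf f (Nat.lt_succ_self f) _ _ _ h1
          have hb2 : pvBGo pm f rest mid = some res := IHf f (Nat.lt_succ_self f) _ _ _ h2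
          show (pvBVisit pm f p (out.add p)).bind (fun out' => pvBGo pm f rest out') = some res
          rw [hb1, Option.bind_some]
          exact hb2

theorem pvGetD_mem : ∀ (l : List (String × List String)) (k x : String),
    x ∈ (PySem.Dict.mk l).getD k [] → x ∈ l.flatMap Prod.snd := by
  intro l
  induction l with
  | nil => intro k x hx; simp [PySem.Dict.getD, PySem.Dict.get?] at hx
  | cons kv rest IH =>
    intro k x hx
    obtain ⟨k0, v0⟩ := kv
    rw [PySem.Dict.getD, PySem.Dict.get?_mk_cons] at hx
    by_cases hk : (k0 == k) = true
    · simp only [hk, if_true, Option.getD_some] at hx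
      rw [List.flatMap_cons]
      exact List.mem_append_left _ hx
    · simp only [hk] at hx
      rw [List.flatMap_cons]
      exact List.mem_append_right _ (IH k x (by rw [PySem.Dict.getD]; exact hx))

theorem pvRLoop_total (pm : List (String × List String)) :
    ∀ fuel stack (out : PySem.Set String),
      (∀ s ∈ stack, s ∈ pm.flatMap Prod.snd) →
      ((pm.flatMap Prod.snd).toFinset.filter (fun x => x ∉ out)).card ≤ fuel →
      ∃ res, pvRLoop (PySem.Dict.mk pm) fuel stack out = some res := by
  intro fuel
  induction fuel using Nat.strong_induction_on with
  | _ fuel IHf =>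
    intro stack
    induction stack with
    | nil => intro out _ _; exact ⟨out, pvRLoop.eq_1 _ _ _⟩
    | cons p r IH =>
      intro out hsub hcard
      rw [pvRLoop.eq_def]; dsimp only
      by_cases hc : PySem.Set.contains out p
      · simp only [hc, if_true]
        exact IH out (fun s hs => hsub s (List.mem_cons_of_mem p hs)) hcard
      · simp only [hc, Bool.false_eq_true, if_false]
        have hpout : p ∉ out := fun hmem => hc ((PySem.Set.contains_iff out p).mpr hmem)
        have hpfilter : p ∈ (pm.flatMap Prod.snd).toFinset.filter (fun x => x ∉ out) := by
          refine Finset.mem_filter.mpr ⟨?_, hpout⟩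
          exact List.mem_toFinset.mpr (hsub p List.mem_cons_self)
        have hpos : 0 < ((pm.flatMap Prod.snd).toFinset.filter (fun x => x ∉ out)).card :=
          Finset.card_pos.mpr ⟨p, hpfilter⟩
        cases fuel with
        | zero => omega
        | succ f =>
          apply IHf f (Nat.lt_succ_self f)
          · intro s hs
            rcases List.mem_append.mp hs with hs | hs
            · exact pvGetD_mem pm p s (List.mem_reverse.mp hs)
            · exact hsub s (List.mem_cons_of_mem p hs)
          · have herase : (pm.flatMap Prod.snd).toFinset.filter (fun x => x ∉ out.add p) =
                ((pm.flatMap Prod.snd).toFinset.filter (fun x => x ∉ out)).erase p := by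
              ext x
              simp only [Finset.mem_erase, Finset.mem_filter, PySem.Set.mem_add]
              tauto
            rw [herase, Finset.card_erase_of_mem hpfilter]
            omega

-- ===== VERDICT (by name: the statement is the Claim_ definition above) =====
theorem get_all_parents_py_spec : Claim_equal_get_all_parents_py := by
  intro tag parent_map _
  unfold Spec_get_all_parents_py get_all_parents_py get_all_parents_py_alt
  by_cases hs : (PySem.Str.strip (if tag == "" then "" else tag) == "") = true
  · simp only [hs, if_true]
  · simp only [hs, Bool.false_eq_true, if_false]
    obtain ⟨res, hres⟩ := pvRLoop_total parent_map ((parent_map.flatMap Prod.snd).length + 1)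
      ((PySem.Dict.mk parent_map).getD (PySem.Str.strip (if tag == "" then "" else tag)) []).reverse
      PySem.Set.empty
      (fun s hs' => pvGetD_mem parent_map _ s (List.mem_reverse.mp hs'))
      (by
        calc ((parent_map.flatMap Prod.snd).toFinset.filter
                (fun x => x ∉ (PySem.Set.empty : PySem.Set String))).card
            ≤ (parent_map.flatMap Prod.snd).toFinset.card := Finset.card_filter_le _ _
          _ ≤ (parent_map.flatMap Prod.snd).length := (parent_map.flatMap Prod.snd).toFinset_card_le
          _ ≤ (parent_map.flatMap Prod.snd).length + 1 := Nat.le_succ _)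
  -- both sides compute the same some res
    rw [pvALoop_eq_rLoop, hres, pvBVisit, pvRLoop_to_bGo (PySem.Dict.mk parent_map) _ _ _ _ hres]
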